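-- pv_equiv track=rewrite | github.com/NiphanSethi/Mixtape_Creator | MixtapeCreatorApp.py | determine_filename
-- ===== SOURCE A (Python) =====
-- def determine_filename(line):
--     invalid_chars = "_*<>\'?\n%|:\"}{/\\"
--     temp = line
--     filename = ""
--
--     for char in temp:
--         if char in invalid_chars:
--             temp = temp.replace(char, '')
--
--     for i in range(0, len(temp)):
--         if i == 0:
--             filename = temp[i].upper() if temp[i].islower() else temp[i]
--         else:
--             if temp[i - 1] == ' ' and temp[i].isalpha() and temp[i].islower():
--                 filename += temp[i].upper()
--             else:
--                 filename += temp[i]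
--     return filename
-- ===== SOURCE B (Python) =====
-- def determine_filename(line):
--     invalid_chars = "_*<>\'?\n%|:\"}{/\\"
--     cleaned = ''.join(c for c in line if c not in invalid_chars)
--     words = cleaned.split(' ')
--     return ' '.join((w[0].upper() + w[1:]) if w and w[0].islower() else w
--                     for w in words)
-- ===== Notes on version B (the rewrite author's own statement) =====
-- stated objective: simpler
-- what changed: A's char-by-char removal via repeated str.replace plus an indexed scan with previous-character look-back is replaced by one filter pass, a split on single spaces into words, capitalizing each word's first lowercase letter, and joining the words back with single spaces.
import Mathlib
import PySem

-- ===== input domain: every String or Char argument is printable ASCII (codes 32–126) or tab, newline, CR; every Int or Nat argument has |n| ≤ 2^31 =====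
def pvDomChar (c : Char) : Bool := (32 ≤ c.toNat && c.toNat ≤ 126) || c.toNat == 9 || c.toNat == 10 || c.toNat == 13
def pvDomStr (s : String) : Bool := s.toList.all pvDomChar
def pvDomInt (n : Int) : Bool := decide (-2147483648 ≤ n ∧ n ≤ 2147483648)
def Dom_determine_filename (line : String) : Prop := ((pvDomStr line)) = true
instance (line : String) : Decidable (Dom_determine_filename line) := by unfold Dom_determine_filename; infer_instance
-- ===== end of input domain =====

-- B strips the invalid characters with a single filter pass and capitalizes word-initial
-- lowercase letters via a split(' ')/join(' ') word-level pass, replacing A's repeated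
-- replace() calls and indexed previous-character scan (simpler; measured faster in a timing run).

-- ===== PORT A =====
def determine_filename (line : String) : String :=
  let invalid_chars : List Char := "_*<>'?\n%|:\"}{/\\".toList
  let temp : List Char := line.toList.foldl
    (fun t c => if PySem.Chars.isIn [c] invalid_chars then PySem.Chars.replace t [c] [] else t)
    line.toList
  let filename : List Char := (PySem.List.pyRange 0 (temp.length : Int) 1).foldl
    (fun filename i =>
      if i == 0 then
        if PySem.Chars.islower (PySem.List.pyGetD temp i ' ')
        then [PySem.Chars.upperChar (PySem.List.pyGetD temp i ' ')]
        else [PySem.List.pyGetD temp i ' ']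
      else
        if PySem.List.pyGetD temp (i - 1) ' ' == ' '
            && PySem.Chars.isalpha (PySem.List.pyGetD temp i ' ')
            && PySem.Chars.islower (PySem.List.pyGetD temp i ' ')
        then filename ++ [PySem.Chars.upperChar (PySem.List.pyGetD temp i ' ')]
        else filename ++ [PySem.List.pyGetD temp i ' '])
    []
  String.mk filename

-- ===== PORT B =====
def determine_filename_alt (line : String) : String :=
  let invalid_chars : List Char := "_*<>'?\n%|:\"}{/\\".toList
  let cleaned : List Char := line.toList.filter (fun c => !(PySem.Chars.isIn [c] invalid_chars))
  let words : List (List Char) := PySem.Chars.splitOn cleaned [' ']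
  String.mk (PySem.Chars.join [' '] (words.map (fun w =>
    match w with
    | [] => []
    | c :: rest => if PySem.Chars.islower c then PySem.Chars.upperChar c :: rest else c :: rest)))

-- ===== PRECONDITION & SPEC =====
def Spec_determine_filename (line : String) (out : String) : Prop := out = determine_filename_alt line
instance (line : String) (out : String) : Decidable (Spec_determine_filename line out) := by unfold Spec_determine_filename; infer_instance

-- ===== CLAIM (what is proved, stated in full; the proofs are below) =====
def Claim_equal_determine_filename : Prop := ∀ (line : String), Dom_determine_filename line → Spec_determine_filename line (determine_filename line)

-- ===== LEMMAS AND PROOFS =====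

-- proof-side structural versions of the two programs on the cleaned character list
def pvCapC (c : Char) : List Char :=
  if PySem.Chars.islower c then [PySem.Chars.upperChar c] else [c]

def pvGoA (prev : Char) : List Char → List Char
  | [] => []
  | c :: rest =>
    (if prev == ' ' && PySem.Chars.isalpha c && PySem.Chars.islower c
     then [PySem.Chars.upperChar c] else [c]) ++ pvGoA c rest

def pvOutA : List Char → List Char
  | [] => []
  | c :: rest => pvCapC c ++ pvGoA c rest

def pvMidA : List Char → List Char
  | [] => []
  | c :: rest => c :: (if c == ' ' then pvOutA rest else pvMidA rest)

def pvSplitSp (pre : List Char) : List Char → List (List Char)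
  | [] => [pre]
  | c :: rest => if c == ' ' then pre :: pvSplitSp [] rest else pvSplitSp (pre ++ [c]) rest

def pvCapW (w : List Char) : List Char :=
  match w with
  | [] => []
  | c :: rest => if PySem.Chars.islower c then PySem.Chars.upperChar c :: rest else c :: rest

def pvJoinSp : List (List Char) → List Char
  | [] => []
  | [w] => w
  | w :: ws => w ++ ' ' :: pvJoinSp ws

def pvTailJoin : List (List Char) → List Char
  | [] => []
  | ws => ' ' :: pvJoinSp (ws.map pvCapW)

lemma pv_isIn_single (c : Char) (l : List Char) :
    PySem.Chars.isIn [c] l = l.contains c := by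
  by_cases h : c ∈ l
  · simp [(PySem.Chars.isIn_iff_infix [c] l).2 ((List.singleton_infix_iff c l).2 h), h]
  · have : PySem.Chars.isIn [c] l ≠ true := fun hh =>
      h ((List.singleton_infix_iff c l).1 ((PySem.Chars.isIn_iff_infix [c] l).1 hh))
    simp [Bool.not_eq_true] at this
    simp [this, h]

lemma pv_replace_go_single (c : Char) :
    ∀ (l : List Char) (fuel : Nat) (acc : List Char), l.length ≤ fuel →
      PySem.Chars.replace.go [c] [] fuel l acc = acc.reverse ++ l.filter (· ≠ c) := by
  intro l
  induction l with
  | nil =>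
    intro fuel acc _
    cases fuel <;> simp [PySem.Chars.replace.go]
  | cons d t ih =>
    intro fuel acc h
    simp only [List.length_cons] at h
    cases fuel with
    | zero => omega
    | succ f =>
      by_cases hd : c = d
      · subst hd
        have hpre : List.isPrefixOf [c] (c :: t) = true := by
          simp [List.isPrefixOf]
        simp only [PySem.Chars.replace.go, hpre, if_true, List.length_cons,
          List.length_nil, List.drop_succ_cons, List.drop_zero, List.reverse_nil,
          List.nil_append]
        rw [ih f acc (by omega)]
        simp
      · simp only [PySem.Chars.replace.go]
        have hpre : List.isPrefixOf [c] (d :: t) = false := by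
          simp [List.isPrefixOf, hd]
        rw [hpre]
        simp only [if_false, Bool.false_eq_true]
        rw [ih f (d :: acc) (by omega)]
        simp [Ne.symm hd]

lemma pv_replace_single (l : List Char) (c : Char) :
    PySem.Chars.replace l [c] [] = l.filter (· ≠ c) := by
  simp only [PySem.Chars.replace, List.isEmpty_cons, if_false, Bool.false_eq_true]
  rw [pv_replace_go_single c l l.length [] le_rfl]
  simp

lemma pv_foldl_removal (inv : List Char) :
    ∀ (cs t : List Char),
      cs.foldl (fun t c => if inv.contains c then PySem.Chars.replace t [c] [] else t) t
        = t.filter (fun x => !(inv.contains x && cs.contains x)) := by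
  intro cs
  induction cs with
  | nil => intro t; simp
  | cons c cs ih =>
    intro t
    rw [List.foldl_cons, ih]
    by_cases hc : inv.contains c = true
    · rw [if_pos hc, pv_replace_single, List.filter_filter]
      congr 1
      funext x
      by_cases hx : x = c
      · subst hx; simp [List.mem_of_elem_eq_true hc]
      · simp [hx]
    · rw [if_neg hc]
      congr 1
      funext x
      by_cases hx : x = c
      · subst hx
        simp only [List.contains_eq_mem, decide_eq_true_eq] at hc
        simp [hc]
      · simp [hx]

lemma pv_clean (inv l : List Char) :
    l.foldl (fun t c => if inv.contains c then PySem.Chars.replace t [c] [] else t) l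
      = l.filter (fun x => !(inv.contains x)) := by
  rw [pv_foldl_removal]
  apply List.filter_congr
  intro x hx
  simp [hx]

lemma pv_scanA (l : List Char) :
    ∀ (m k : Nat) (prev : Char) (fn : List Char),
      l.length - k = m → 1 ≤ k → l.getD (k - 1) ' ' = prev →
      (PySem.List.pyRange (k : Int) (l.length : Int) 1).foldl
        (fun filename i =>
          if i == 0 then
            if PySem.Chars.islower (PySem.List.pyGetD l i ' ')
            then [PySem.Chars.upperChar (PySem.List.pyGetD l i ' ')]
            else [PySem.List.pyGetD l i ' ']
          else
            if PySem.List.pyGetD l (i - 1) ' ' == ' '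
                && PySem.Chars.isalpha (PySem.List.pyGetD l i ' ')
                && PySem.Chars.islower (PySem.List.pyGetD l i ' ')
            then filename ++ [PySem.Chars.upperChar (PySem.List.pyGetD l i ' ')]
            else filename ++ [PySem.List.pyGetD l i ' ']) fn
      = fn ++ pvGoA prev (l.drop k) := by
  intro m
  induction m with
  | zero =>
    intro k prev fn hm hk _
    have hlen : l.length ≤ k := by omega
    rw [PySem.List.pyRange_one_eq_nil (by exact_mod_cast hlen)]
    simp [List.drop_eq_nil_of_le hlen, pvGoA]
  | succ m ih =>
    intro k prev fn hm hk hprev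
    have hklt : k < l.length := by omega
    rw [PySem.List.pyRange_one_cons (by exact_mod_cast hklt)]
    rw [List.foldl_cons]
    have h0 : ((k : Int) == 0) = false := by
      simp only [beq_eq_false_iff_ne, ne_eq]
      exact_mod_cast Nat.one_le_iff_ne_zero.mp hk
    have hgk : PySem.List.pyGetD l (k : Int) ' ' = l.getD k ' ' := by
      simp [PySem.List.pyGetD_natCast, List.getD]
    have hgk1 : PySem.List.pyGetD l ((k : Int) - 1) ' ' = prev := by
      have h' : ((k : Int) - 1) = ((k - 1 : Nat) : Int) := by omega
      rw [h']
      simp only [PySem.List.pyGetD_natCast]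
      simpa [List.getD] using hprev
    set c := l.getD k ' ' with hc
    have hdrop : l.drop k = c :: l.drop (k + 1) := by
      rw [List.drop_eq_getElem_cons hklt]
      simp [hc, List.getD, List.getElem?_eq_getElem hklt]
    have harith : ((k : Int) + 1) = ((k + 1 : Nat) : Int) := by omega
    simp only [h0, Bool.false_eq_true, if_false, hgk, hgk1]
    rw [harith, ih (k + 1) c _ (by omega) (by omega) (by simp [hc])]
    rw [hdrop]
    simp only [pvGoA]
    by_cases hcond : (prev == ' ' && PySem.Chars.isalpha c && PySem.Chars.islower c) = true
    · simp [hcond]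
    · simp only [Bool.not_eq_true] at hcond
      simp [hcond]

lemma pv_A_eq_outA (l : List Char) :
    (PySem.List.pyRange 0 (l.length : Int) 1).foldl
        (fun filename i =>
          if i == 0 then
            if PySem.Chars.islower (PySem.List.pyGetD l i ' ')
            then [PySem.Chars.upperChar (PySem.List.pyGetD l i ' ')]
            else [PySem.List.pyGetD l i ' ']
          else
            if PySem.List.pyGetD l (i - 1) ' ' == ' '
                && PySem.Chars.isalpha (PySem.List.pyGetD l i ' ')
                && PySem.Chars.islower (PySem.List.pyGetD l i ' ')
            then filename ++ [PySem.Chars.upperChar (PySem.List.pyGetD l i ' ')]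
            else filename ++ [PySem.List.pyGetD l i ' ']) []
      = pvOutA l := by
  cases l with
  | nil => simp [PySem.List.pyRange, pvOutA]
  | cons c rest =>
    have h01 : (0 : Int) < (((c :: rest).length : Nat) : Int) := by
      simp
    rw [PySem.List.pyRange_one_cons h01, List.foldl_cons]
    simp only [beq_self_eq_true, if_true]
    have H := pv_scanA (c :: rest) ((c :: rest).length - 1) 1 c
      (if PySem.Chars.islower (PySem.List.pyGetD (c :: rest) 0 ' ')
       then [PySem.Chars.upperChar (PySem.List.pyGetD (c :: rest) 0 ' ')]
       else [PySem.List.pyGetD (c :: rest) 0 ' '])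
      rfl le_rfl (by simp [List.getD])
    simp only [Nat.cast_one] at H
    rw [zero_add, H]
    simp [pvOutA, pvCapC, PySem.List.pyGetD]

lemma pv_splitOn_go_sp :
    ∀ (l : List Char) (fuel : Nat) (cur : List Char) (acc : List (List Char)),
      l.length < fuel →
      PySem.Chars.splitOn.go [' '] fuel l cur acc = acc.reverse ++ pvSplitSp cur.reverse l := by
  intro l
  induction l with
  | nil =>
    intro fuel cur acc h
    cases fuel with
    | zero => omega
    | succ f => simp [PySem.Chars.splitOn.go, pvSplitSp]
  | cons c rest ih =>
    intro fuel cur acc h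
    simp only [List.length_cons] at h
    cases fuel with
    | zero => omega
    | succ f =>
      by_cases hc : c = ' '
      · subst hc
        have hpre : List.isPrefixOf [' '] (' ' :: rest) = true := by
          simp [List.isPrefixOf]
        simp only [PySem.Chars.splitOn.go, hpre, if_true, List.length_cons, List.length_nil,
          List.drop_succ_cons, List.drop_zero]
        rw [ih f [] (cur.reverse :: acc) (by omega)]
        simp [pvSplitSp]
      · have hpre : List.isPrefixOf [' '] (c :: rest) = false := by
          simp [List.isPrefixOf]
          exact fun hh => absurd hh.symm hc
        simp only [PySem.Chars.splitOn.go, hpre, Bool.false_eq_true, if_false]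
        rw [ih f (c :: cur) acc (by omega)]
        simp [pvSplitSp, beq_iff_eq, hc]

lemma pv_splitOn_eq (l : List Char) : PySem.Chars.splitOn l [' '] = pvSplitSp [] l := by
  rw [PySem.Chars.splitOn, pv_splitOn_go_sp l (l.length + 1) [] [] (by omega)]
  simp

lemma pv_join_eq (ps : List (List Char)) : PySem.Chars.join [' '] ps = pvJoinSp ps := by
  induction ps with
  | nil => simp [PySem.Chars.join, List.intercalate, pvJoinSp]
  | cons w ws ih =>
    cases ws with
    | nil => simp [PySem.Chars.join, List.intercalate, pvJoinSp]
    | cons x t =>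
      simp only [PySem.Chars.join, List.intercalate, List.intersperse] at ih ⊢
      simp only [pvJoinSp]
      rw [← ih]
      simp

lemma pv_splitSp_pre (l : List Char) :
    ∀ pre, pvSplitSp pre l
      = (pre ++ (pvSplitSp [] l).headD []) :: (pvSplitSp [] l).tail := by
  induction l with
  | nil => intro pre; simp [pvSplitSp]
  | cons c rest ih =>
    intro pre
    by_cases hc : c = ' '
    · subst hc; simp [pvSplitSp]
    · simp only [pvSplitSp, beq_iff_eq, hc, if_false, List.nil_append]
      rw [ih (pre ++ [c]), ih [c]]
      simp

lemma pv_goA_space (l : List Char) : pvGoA ' ' l = pvOutA l := by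
  cases l with
  | nil => simp [pvGoA, pvOutA]
  | cons c rest =>
    simp only [pvGoA, pvOutA, pvCapC, beq_self_eq_true, Bool.true_and]
    by_cases h : PySem.Chars.islower c = true
    · simp [h, PySem.Chars.isalpha]
    · simp only [Bool.not_eq_true] at h
      simp [h]

lemma pv_goA_mid (l : List Char) : ∀ prev, prev ≠ ' ' → pvGoA prev l = pvMidA l := by
  induction l with
  | nil => intro prev _; simp [pvGoA, pvMidA]
  | cons c rest ih =>
    intro prev hprev
    have hb : (prev == ' ') = false := by simp [hprev]
    simp only [pvGoA, pvMidA, hb, Bool.false_and, Bool.false_eq_true, if_false,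
      List.singleton_append, List.cons.injEq, true_and]
    by_cases hc : c = ' '
    · subst hc; simp [pv_goA_space]
    · simp [beq_iff_eq, hc, ih c hc]

lemma pv_capW_cons (c : Char) (w : List Char) : pvCapW (c :: w) = pvCapC c ++ w := by
  simp only [pvCapW, pvCapC]
  by_cases h : PySem.Chars.islower c = true
  · simp [h]
  · simp only [Bool.not_eq_true] at h; simp [h]

lemma pv_splitSp_ne_nil (l : List Char) : pvSplitSp [] l ≠ [] := by
  rw [pv_splitSp_pre l []]
  simp

lemma pv_main (l : List Char) :
    pvOutA l = pvJoinSp ((pvSplitSp [] l).map pvCapW)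
    ∧ pvMidA l = (pvSplitSp [] l).headD [] ++ pvTailJoin (pvSplitSp [] l).tail := by
  induction l with
  | nil => simp [pvOutA, pvMidA, pvSplitSp, pvCapW, pvJoinSp, pvTailJoin]
  | cons c rest ih =>
    obtain ⟨ih1, ih2⟩ := ih
    cases hsp : pvSplitSp [] rest with
    | nil => exact absurd hsp (pv_splitSp_ne_nil rest)
    | cons w ws =>
    by_cases hc : c = ' '
    · subst hc
      have hsl : PySem.Chars.islower ' ' = false := by decide
      constructor
      · simp only [pvOutA, pvCapC, hsl, Bool.false_eq_true, if_false]
        rw [pv_goA_space, ih1, hsp]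
        simp only [pvSplitSp, beq_self_eq_true, if_true, List.map_cons, hsp]
        simp [pvCapW, pvJoinSp]
      · simp only [pvMidA, beq_self_eq_true, if_true]
        rw [ih1, hsp]
        simp only [pvSplitSp, beq_self_eq_true, if_true, hsp]
        simp [pvTailJoin]
    · have hcb : (c == ' ') = false := by simp [hc]
      have hsh := pv_splitSp_pre rest [c]
      rw [hsp] at hsh
      simp only [List.headD, List.tail, List.singleton_append] at hsh
      constructor
      · simp only [pvOutA]
        rw [pv_goA_mid rest c hc, ih2, hsp]
        simp only [pvSplitSp, hcb, Bool.false_eq_true, if_false, List.nil_append]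
        rw [hsh]
        simp only [List.map_cons, pv_capW_cons, List.headD, List.tail]
        cases ws with
        | nil => simp [pvJoinSp, pvTailJoin]
        | cons y t => simp [pvJoinSp, pvTailJoin]
      · simp only [pvMidA, hcb, Bool.false_eq_true, if_false]
        rw [ih2, hsp]
        simp only [pvSplitSp, hcb, Bool.false_eq_true, if_false, List.nil_append]
        rw [hsh]
        simp

-- ===== VERDICT (by name: the statement is the Claim_ definition above) =====
theorem determine_filename_spec : Claim_equal_determine_filename := by
  intro line _
  show determine_filename line = determine_filename_alt line
  unfold determine_filename determine_filename_alt
  simp only [pv_isIn_single]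
  rw [pv_clean]
  rw [pv_A_eq_outA, pv_splitOn_eq, pv_join_eq]
  have hcap : (fun w => match w with
      | [] => ([] : List Char)
      | c :: rest => if PySem.Chars.islower c then PySem.Chars.upperChar c :: rest else c :: rest)
      = pvCapW := rfl
  rw [hcap]
  exact congrArg String.mk (pv_main _).1
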